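-- pv_equiv track=rewrite | github.com/chibo17/irz | p01/p01.py | NtoNN
-- ===== SOURCE A (Python) =====
-- def NtoNN(n):
--     i,j= 1, 1
--     k=1
--     while k<n:
--         if j==1:
--             j = i + 1
--             i = 1
--         else:
--             j -= 1
--             i += 1
--         #if gcd(i,j)==1:   # ulomki
--         k+=1
--     return (i,j)
-- ===== SOURCE B (Python) =====
-- def _isqrt(a):
--     # Newton's method floor square root (no imports; a >= 1 here)
--     if a <= 1:
--         return a
--     guess = a // 2
--     nxt = (guess + a // guess) // 2
--     while nxt < guess:
--         guess = nxt
--         nxt = (guess + a // guess) // 2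
--     return guess
--
--
-- def NtoNN(n):
--     # closed form: find the diagonal d with T(d-1) < m <= T(d) via inverse triangular number
--     m = n if n > 1 else 1
--     d = (_isqrt(8 * m - 7) + 1) // 2
--     i = m - d * (d - 1) // 2
--     j = d + 1 - i
--     return (i, j)
-- ===== Notes on version B (the rewrite author's own statement) =====
-- stated objective: faster
-- what changed: Replaced A's O(n) step-by-step walk along Cantor diagonals with a closed form: invert the triangular number with a hand-written Newton integer square root, then compute the offset within the diagonal.
import Mathlib
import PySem

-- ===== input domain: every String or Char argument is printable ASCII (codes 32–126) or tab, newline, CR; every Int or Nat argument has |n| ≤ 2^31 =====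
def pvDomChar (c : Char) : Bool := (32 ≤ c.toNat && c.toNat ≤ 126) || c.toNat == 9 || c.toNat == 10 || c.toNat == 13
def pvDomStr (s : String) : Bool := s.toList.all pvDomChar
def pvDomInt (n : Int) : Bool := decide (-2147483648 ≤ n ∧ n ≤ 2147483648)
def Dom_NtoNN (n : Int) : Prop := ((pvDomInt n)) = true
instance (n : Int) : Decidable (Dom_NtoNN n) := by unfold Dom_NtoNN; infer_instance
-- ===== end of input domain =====

-- B replaces A's O(n) step-by-step diagonal walk by a closed form: invert the
-- triangular number with a Newton integer square root, then offset (objective: faster).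

-- ===== PORT A =====
-- the while loop: one recursive step per iteration, k<n gives (n-1).toNat iterations
def loopA : Nat → Int → Int → Int × Int
  | 0, i, j => (i, j)
  | t + 1, i, j => if j == 1 then loopA t 1 (i + 1) else loopA t (i + 1) (j - 1)

def NtoNN (n : Int) : List Int :=
  let p := loopA (n - 1).toNat 1 1
  [p.1, p.2]

-- ===== PORT B =====
-- Source B's hand-written Newton floor-square-root (all values are nonnegative, so Nat
-- arithmetic and Nat division are exact for Python's // here)
def isqrtIter (a g : Nat) : Nat :=
  let nxt := (g + a / g) / 2
  if _h : nxt < g then isqrtIter a nxt else g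
termination_by g

def isqrtB (a : Nat) : Nat := if a ≤ 1 then a else isqrtIter a (a / 2)

def NtoNN_alt (n : Int) : List Int :=
  let m : Nat := if n > 1 then n.toNat else 1
  let d : Nat := (isqrtB (8 * m - 7) + 1) / 2
  let i : Nat := m - d * (d - 1) / 2
  let j : Nat := d + 1 - i
  [(i : Int), (j : Int)]

-- ===== PRECONDITION & SPEC =====
def Spec_NtoNN (n : Int) (out : List Int) : Prop := out = NtoNN_alt n
instance (n : Int) (out : List Int) : Decidable (Spec_NtoNN n out) := by unfold Spec_NtoNN; infer_instance

-- ===== CLAIM (what is proved, stated in full; the proofs are below) =====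
def Claim_equal_NtoNN : Prop := ∀ (n : Int), Dom_NtoNN n → Spec_NtoNN n (NtoNN n)

-- ===== LEMMAS AND PROOFS =====

-- Source B's Newton iteration computes the floor square root
theorem isqrtIter_eq (a : Nat) (ha : 2 ≤ a) :
    ∀ g, 1 ≤ g → Nat.sqrt a ≤ g → isqrtIter a g = Nat.sqrt a := by
  intro g
  induction g using Nat.strong_induction_on with
  | _ g ih =>
    intro hg1 hsg
    unfold isqrtIter
    set s := Nat.sqrt a with hs
    have hs2 : s * s ≤ a := Nat.sqrt_le a
    have hs3 : a < (s + 1) * (s + 1) := Nat.lt_succ_sqrt a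
    have hs1 : 1 ≤ s := by
      rw [hs]; exact Nat.le_sqrt.mpr (by omega)
    by_cases h : (g + a / g) / 2 < g
    · simp only [h, dif_pos]
      apply ih _ h _ _
      · -- next ≥ 1 follows from next ≥ s below, but we need s ≤ next first
        have hnext : s ≤ (g + a / g) / 2 := by
          have h1 : (2 * s - g) * g ≤ a := by
            by_cases hc : g ≤ 2 * s
            · have : (2 * s - g) * g ≤ s * s := by nlinarith [Nat.sub_add_cancel hc]
              omega
            · have : 2 * s - g = 0 := by omega
              simp [this]
          have h2 : 2 * s - g ≤ a / g := (Nat.le_div_iff_mul_le (by omega)).mpr h1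
          omega
        omega
      · have h1 : (2 * s - g) * g ≤ a := by
          by_cases hc : g ≤ 2 * s
          · have : (2 * s - g) * g ≤ s * s := by nlinarith [Nat.sub_add_cancel hc]
            omega
          · have : 2 * s - g = 0 := by omega
            simp [this]
        have h2 : 2 * s - g ≤ a / g := (Nat.le_div_iff_mul_le (by omega)).mpr h1
        omega
    · simp only [h, dif_neg, not_false_iff]
      -- exit: next ≥ g forces g*g ≤ a, so g ≤ s; with s ≤ g we get g = s
      have h1 : g ≤ a / g := by omega
      have h2 : g * g ≤ a := (Nat.le_div_iff_mul_le (by omega)).mp h1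
      have h3 : g ≤ s := by
        rw [hs]; exact Nat.le_sqrt.mpr h2
      omega

theorem isqrtB_eq (a : Nat) : isqrtB a = Nat.sqrt a := by
  unfold isqrtB
  by_cases h : a ≤ 1
  · interval_cases a <;> simp
  · simp only [h, if_neg, not_false_iff]
    have ha : 2 ≤ a := by omega
    have hs2 : Nat.sqrt a * Nat.sqrt a ≤ a := Nat.sqrt_le a
    have hs3 : a < (Nat.sqrt a + 1) * (Nat.sqrt a + 1) := Nat.lt_succ_sqrt a
    have hs1 : 1 ≤ Nat.sqrt a := Nat.le_sqrt.mpr (by omega)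
    apply isqrtIter_eq a ha
    · have : 2 ≤ a / 2 * 2 + 1 := by omega
      omega
    · -- sqrt a ≤ a/2 for a ≥ 2
      have h2s : 2 * Nat.sqrt a ≤ a := by nlinarith
      omega

-- triangular numbers
def T (d : Nat) : Nat := d * (d + 1) / 2

theorem T_succ (d : Nat) : T (d + 1) = T d + (d + 1) := by
  unfold T
  obtain ⟨k, hk⟩ := (Nat.even_mul_succ_self d).two_dvd
  have h : (d + 1) * (d + 1 + 1) = d * (d + 1) + 2 * (d + 1) := by ring
  omega

theorem T_mono {d e : Nat} (h : d ≤ e) : T d ≤ T e := by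
  induction e with
  | zero => have hd0 : d = 0 := by omega
            simp [hd0]
  | succ e ih =>
    rcases Nat.lt_or_ge d (e + 1) with h' | h'
    · have h2 := ih (by omega)
      have h3 := T_succ e
      omega
    · have hde : d = e + 1 := by omega
      rw [hde]

-- the diagonal index of the m-th pair, and B's row/column
def Dg (m : Nat) : Nat := (Nat.sqrt (8 * m - 7) + 1) / 2
def Ig (m : Nat) : Nat := m - T (Dg m - 1)
def Jg (m : Nat) : Nat := Dg m + 1 - Ig m

theorem tri_bounds (m r s : Nat) (hm : 1 ≤ m)
    (h1 : r * r ≤ 8 * m - 7) (h2 : 8 * m - 7 < (r + 1) * (r + 1))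
    (hc : r = 2 * s + 1 ∨ r = 2 * s + 2) :
    s * (s + 1) / 2 < m ∧ m ≤ (s + 1) * (s + 2) / 2 := by
  have hP : 2 ∣ s * (s + 1) := (Nat.even_mul_succ_self s).two_dvd
  have hQ : 2 ∣ (s + 1) * (s + 2) := (Nat.even_mul_succ_self (s + 1)).two_dvd
  have hQP : (s + 1) * (s + 2) = s * (s + 1) + 2 * (s + 1) := by ring
  rcases hc with h | h
  · have f1 : r * r = 4 * (s * (s + 1)) + 1 := by rw [h]; ring
    have f2 : (r + 1) * (r + 1) = 4 * (s * (s + 1)) + 4 * s + 4 := by rw [h]; ring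
    constructor <;> omega
  · have f1 : r * r = 4 * (s * (s + 1)) + 4 * s + 4 := by rw [h]; ring
    have f2 : (r + 1) * (r + 1) = 4 * ((s + 1) * (s + 2)) + 1 := by rw [h]; ring
    constructor <;> omega

theorem Dg_bounds (m : Nat) (hm : 1 ≤ m) :
    1 ≤ Dg m ∧ T (Dg m - 1) < m ∧ m ≤ T (Dg m) := by
  unfold Dg
  set r := Nat.sqrt (8 * m - 7) with hr
  have h1 : r * r ≤ 8 * m - 7 := Nat.sqrt_le _
  have h2 : 8 * m - 7 < (r + 1) * (r + 1) := Nat.lt_succ_sqrt _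
  have hr1 : 1 ≤ r := by rw [hr]; exact Nat.le_sqrt.mpr (by omega)
  set d := (r + 1) / 2 with hd
  have hd1 : 1 ≤ d := by omega
  have hc : r = 2 * (d - 1) + 1 ∨ r = 2 * (d - 1) + 2 := by omega
  obtain ⟨hb1, hb2⟩ := tri_bounds m r (d - 1) hm h1 h2 hc
  have hTlo : T (d - 1) = (d - 1) * (d - 1 + 1) / 2 := rfl
  have hThi : T d = d * (d + 1) / 2 := rfl
  have e1 : (d - 1 + 1) * (d - 1 + 2) = d * (d + 1) := by
    rw [show d - 1 + 1 = d from by omega, show d - 1 + 2 = d + 1 from by omega]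
  refine ⟨hd1, by omega, ?_⟩
  rw [hThi, ← e1]
  exact hb2

theorem Dg_unique (d m : Nat) (hd : 1 ≤ d) (h1 : T (d - 1) < m) (h2 : m ≤ T d) :
    Dg m = d := by
  have hm : 1 ≤ m := by omega
  obtain ⟨hd1', h1', h2'⟩ := Dg_bounds m hm
  rcases Nat.lt_trichotomy (Dg m) d with h | h | h
  · have : T (Dg m) ≤ T (d - 1) := T_mono (by omega)
    omega
  · exact h
  · have : T d ≤ T (Dg m - 1) := T_mono (by omega)
    omega

-- peel A's loop at the far end instead of the front
theorem loopA_snoc (t : Nat) : ∀ i j : Int,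
    loopA (t + 1) i j =
      (if (loopA t i j).2 == 1 then (1, (loopA t i j).1 + 1)
       else ((loopA t i j).1 + 1, (loopA t i j).2 - 1)) := by
  induction t with
  | zero => intro i j; simp [loopA]
  | succ t ih =>
    intro i j
    show loopA (t + 1 + 1) i j = _
    rcases eq_or_ne j 1 with hj | hj
    · simp only [loopA, hj, beq_self_eq_true, if_true]
      exact ih 1 (i + 1)
    · have : (j == 1) = false := by simp [hj]
      simp only [loopA, this, Bool.false_eq_true, if_false]
      exact ih (i + 1) (j - 1)

theorem loopA_closed (t : Nat) : loopA t 1 1 = ((Ig (t + 1) : Int), (Jg (t + 1) : Int)) := by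
  induction t with
  | zero =>
    norm_num [loopA, Ig, Jg, Dg, T, Nat.sqrt_one]
  | succ t ih =>
    set m := t + 1 with hm
    have hm1 : 1 ≤ m := by omega
    obtain ⟨hd1, hlo, hhi⟩ := Dg_bounds m hm1
    set d := Dg m with hdm
    have hTd : T d = T (d - 1) + d := by
      have := T_succ (d - 1)
      rw [Nat.sub_add_cancel hd1] at this
      omega
    have hI : Ig m = m - T (d - 1) := by unfold Ig; rw [← hdm]
    have hJ : Jg m = d + 1 - Ig m := by unfold Jg; rw [← hdm]
    have hIle : Ig m ≤ d := by omega
    have hI1 : 1 ≤ Ig m := by omega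
    rw [loopA_snoc, ih]
    by_cases hcase : Ig m = d
    · -- end of a diagonal: J = 1, step to (1, d+1), next diagonal is d+1
      have hJ1 : Jg m = 1 := by omega
      have hmTd : m = T d := by omega
      have hD' : Dg (m + 1) = d + 1 := by
        apply Dg_unique _ _ (by omega)
        · simp only [Nat.add_sub_cancel]; omega
        · rw [T_succ]; omega
      have hI' : Ig (m + 1) = 1 := by
        unfold Ig; rw [hD']; simp only [Nat.add_sub_cancel]; omega
      have hJ' : Jg (m + 1) = d + 1 := by
        unfold Jg; rw [hD', hI']; omega
      have hif : (((Jg m : Nat) : Int) == 1) = true := by rw [hJ1]; norm_num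
      rw [hif]
      simp only [if_true, hI', hJ', hcase, Prod.mk.injEq]
      constructor
      · norm_num
      · push_cast; ring
    · -- inside a diagonal: J ≠ 1, step to (i+1, j-1), same diagonal
      have hJn : Jg m ≠ 1 := by omega
      have hD' : Dg (m + 1) = d := by
        apply Dg_unique _ _ hd1 (by omega) (by omega)
      have hI' : Ig (m + 1) = Ig m + 1 := by
        unfold Ig; rw [hD', ← hdm]; omega
      have hJ' : Jg (m + 1) = Jg m - 1 := by
        unfold Jg; rw [hD', hI', ← hdm]; omega
      have hif : (((Jg m : Nat) : Int) == 1) = false := by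
        simp only [beq_eq_false_iff_ne, ne_eq]
        intro h
        exact hJn (by exact_mod_cast h)
      rw [hif]
      simp only [Bool.false_eq_true, if_false, hI', hJ', Prod.mk.injEq]
      constructor
      · push_cast; ring
      · have h1j : 1 ≤ Jg m := by omega
        push_cast [Nat.cast_sub h1j]
        ring

theorem NtoNN_alt_closed (n : Int) :
    NtoNN_alt n = [((Ig (if n > 1 then n.toNat else 1) : Nat) : Int),
                   ((Jg (if n > 1 then n.toNat else 1) : Nat) : Int)] := by
  simp only [NtoNN_alt, isqrtB_eq]
  simp only [Jg, Ig, Dg, T]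
  set m : Nat := if n > 1 then n.toNat else 1 with hm
  set d : Nat := (Nat.sqrt (8 * m - 7) + 1) / 2 with hd
  have key : d * (d - 1) = (d - 1) * (d - 1 + 1) := by
    rcases Nat.eq_zero_or_pos d with h | h
    · simp [h]
    · have h2 : d - 1 + 1 = d := by omega
      rw [h2]; ring
  rw [key]

-- ===== VERDICT (by name: the statement is the Claim_ definition above) =====
theorem NtoNN_spec : Claim_equal_NtoNN := by
  intro n _
  unfold Spec_NtoNN
  rw [NtoNN_alt_closed]
  unfold NtoNN
  have hm : (n - 1).toNat + 1 = (if n > 1 then n.toNat else 1) := by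
    split_ifs with h <;> omega
  rw [loopA_closed, hm]
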